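-- pv_equiv track=rewrite | github.com/fsucic02/ppj | LeksickiAnalizator.py | process
-- ===== SOURCE A (Python) =====
-- uniznakovi = ['=', '+', '-', '*', '/', '(', ')', 'za', 'od', 'do', 'az']
--
-- def process(str):
--     result = str
--     i = result.find('//')
--     if i != -1:
--         result = result[:i]
--     for znak in uniznakovi[:7]:
--         result = result.replace(znak, ' ' + znak + ' ')
--     return result
-- ===== SOURCE B (Python) =====
-- def process(str):
--     out = []
--     n = len(str)
--     i = 0
--     while i < n:
--         c = str[i]
--         if c == '/' and i + 1 < n and str[i + 1] == '/':
--             break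
--         if c in '=+-*/()':
--             out.append(' ' + c + ' ')
--         else:
--             out.append(c)
--         i += 1
--     return ''.join(out)
-- ===== Notes on version B (the rewrite author's own statement) =====
-- stated objective: alternative
-- what changed: Replaced A's comment-search-then-truncate followed by seven whole-string .replace passes with a single left-to-right character scan that stops at the comment marker and pads operator characters as it emits them.
import Mathlib
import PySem

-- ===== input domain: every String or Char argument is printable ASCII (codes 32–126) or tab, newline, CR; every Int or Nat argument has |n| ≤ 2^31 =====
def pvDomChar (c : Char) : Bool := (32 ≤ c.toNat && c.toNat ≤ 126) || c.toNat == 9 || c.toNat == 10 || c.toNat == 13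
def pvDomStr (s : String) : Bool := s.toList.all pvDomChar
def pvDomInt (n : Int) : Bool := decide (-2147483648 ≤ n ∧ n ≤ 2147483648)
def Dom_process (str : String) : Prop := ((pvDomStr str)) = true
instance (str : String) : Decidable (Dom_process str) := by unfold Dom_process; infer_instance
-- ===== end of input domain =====

-- B replaces A's find('//') plus seven whole-string .replace passes by ONE left-to-right
-- character scan that stops at the comment marker and pads operator characters as it goes (objective: alternative).

-- ===== PORT A =====
def uniznakovi : List String := ["=", "+", "-", "*", "/", "(", ")", "za", "od", "do", "az"]

def process (str : String) : String :=
  let result := str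
  let i : Int := PySem.Str.find result "//"
  let result := if i ≠ -1 then PySem.Str.slice result none (some i) else result
  (PySem.List.slice uniznakovi none (some 7)).foldl
    (fun result znak => PySem.Str.replace result znak (" " ++ znak ++ " ")) result

-- ===== PORT B =====
def opsB : List Char := ['=', '+', '-', '*', '/', '(', ')']

def bScan : List Char → List Char
  | [] => []
  | c :: rest =>
    if c = '/' ∧ rest.head? = some '/' then []
    else (if c ∈ opsB then [' ', c, ' '] else [c]) ++ bScan rest

def process_alt (str : String) : String := String.ofList (bScan str.toList)

-- ===== PRECONDITION & SPEC =====
def Spec_process (str : String) (out : String) : Prop := out = process_alt str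
instance (str : String) (out : String) : Decidable (Spec_process str out) := by unfold Spec_process; infer_instance

-- ===== CLAIM (what is proved, stated in full; the proofs are below) =====
def Claim_equal_process : Prop := ∀ (str : String), Dom_process str → Spec_process str (process str)

-- ===== LEMMAS AND PROOFS =====

-- A single-character .replace is the per-character flatMap.
theorem go_single (c : Char) (new : List Char) :
    ∀ (l : List Char) (fuel : Nat) (acc : List Char), l.length ≤ fuel →
      PySem.Chars.replace.go [c] new fuel l acc
        = acc.reverse ++ l.flatMap (fun x => if x = c then new else [x]) := by
  intro l
  induction l with
  | nil => intro fuel acc h; cases fuel <;> simp [PySem.Chars.replace.go]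
  | cons x t ih =>
    intro fuel acc h
    cases fuel with
    | zero => simp at h
    | succ f =>
      by_cases hx : x = c
      · subst hx
        have hstep : PySem.Chars.replace.go [x] new (f + 1) (x :: t) acc
            = PySem.Chars.replace.go [x] new f t (new.reverse ++ acc) := by
          simp [PySem.Chars.replace.go, List.isPrefixOf]
        rw [hstep, ih f _ (Nat.le_of_succ_le_succ h)]; simp
      · have hstep : PySem.Chars.replace.go [c] new (f + 1) (x :: t) acc
            = PySem.Chars.replace.go [c] new f t (x :: acc) := by
          simp [PySem.Chars.replace.go, List.isPrefixOf, Ne.symm hx]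
        rw [hstep, ih f _ (Nat.le_of_succ_le_succ h)]; simp [hx]

theorem replace_single (l : List Char) (c : Char) (new : List Char) :
    PySem.Chars.replace l [c] new = l.flatMap (fun x => if x = c then new else [x]) := by
  rw [PySem.Chars.replace]
  simp [go_single c new l l.length [] le_rfl]

-- The seven chained replaces are one flatMap over the operator-padding function.
theorem chain_eq (m : List Char) :
    PySem.Chars.replace (PySem.Chars.replace (PySem.Chars.replace (PySem.Chars.replace
      (PySem.Chars.replace (PySem.Chars.replace (PySem.Chars.replace m
        ['='] [' ', '=', ' ']) ['+'] [' ', '+', ' ']) ['-'] [' ', '-', ' '])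
        ['*'] [' ', '*', ' ']) ['/'] [' ', '/', ' ']) ['('] [' ', '(', ' ']) [')'] [' ', ')', ' ']
    = m.flatMap (fun x => if x ∈ opsB then [' ', x, ' '] else [x]) := by
  simp only [replace_single, List.flatMap_assoc]
  congr 1
  funext x
  by_cases h1 : x = '='
  · simp [h1, opsB]
  by_cases h2 : x = '+'
  · simp [h2, opsB]
  by_cases h3 : x = '-'
  · simp [h3, opsB]
  by_cases h4 : x = '*'
  · simp [h4, opsB]
  by_cases h5 : x = '/'
  · simp [h5, opsB]
  by_cases h6 : x = '('
  · simp [h6, opsB]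
  by_cases h7 : x = ')'
  · simp [h7, opsB]
  simp [opsB, h1, h2, h3, h4, h5, h6, h7]

-- The truncation part of B's scan, isolated.
def cutAux : List Char → List Char
  | [] => []
  | c :: rest => if c = '/' ∧ rest.head? = some '/' then [] else c :: cutAux rest

theorem bScan_eq (l : List Char) :
    bScan l = (cutAux l).flatMap (fun x => if x ∈ opsB then [' ', x, ' '] else [x]) := by
  induction l with
  | nil => simp [bScan, cutAux]
  | cons c rest ih =>
    by_cases h : c = '/' ∧ rest.head? = some '/'
    · simp [bScan, cutAux, h]
    · simp [bScan, cutAux, h, ih]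

theorem slash_prefix_iff (c : Char) (rest : List Char) :
    ['/', '/'] <+: (c :: rest) ↔ (c = '/' ∧ rest.head? = some '/') := by
  cases rest with
  | nil => simp [List.cons_prefix_cons]
  | cons d t => simp [List.cons_prefix_cons, eq_comm]

theorem find_eq_coe (l sub : List Char) (k : Nat)
    (h1 : sub <+: l.drop k) (h2 : ∀ i < k, ¬ sub <+: l.drop i) :
    PySem.Chars.find l sub = (k : Int) := by
  have hinf : sub <:+: l := h1.isInfix.trans (l.drop_suffix k).isInfix
  have h0 : 0 ≤ PySem.Chars.find l sub := (PySem.Chars.find_nonneg_iff _ _).mpr hinf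
  obtain ⟨hp, hmin⟩ := PySem.Chars.find_spec h0
  have hk : (PySem.Chars.find l sub).toNat = k := by
    rcases lt_trichotomy (PySem.Chars.find l sub).toNat k with h | h | h
    · exact absurd hp (h2 _ h)
    · exact h
    · exact absurd h1 (hmin _ h)
  omega

theorem infix_cons_iff (sub : List Char) (c : Char) (rest : List Char)
    (h : ¬ sub <+: (c :: rest)) : (sub <:+: (c :: rest)) ↔ (sub <:+: rest) := by
  constructor
  · intro hi
    obtain ⟨j, hj⟩ := (PySem.Chars.exists_prefix_drop_iff_isIn sub (c :: rest)).mpr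
      ((PySem.Chars.isIn_iff_infix sub (c :: rest)).mpr hi)
    cases j with
    | zero => exact absurd hj h
    | succ j' =>
      have hj' : sub <+: rest.drop j' := by simpa using hj
      exact (PySem.Chars.isIn_iff_infix sub rest).mp
        ((PySem.Chars.exists_prefix_drop_iff_isIn sub rest).mp ⟨j', hj'⟩)
  · intro hi
    exact hi.trans (List.suffix_cons c rest).isInfix

theorem cut_spec (l : List Char) :
    cutAux l = if PySem.Chars.find l ['/', '/'] = -1 then l
               else l.take (PySem.Chars.find l ['/', '/']).toNat := by
  induction l with
  | nil =>
    have : PySem.Chars.find [] ['/', '/'] = -1 := by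
      rw [PySem.Chars.find_eq_neg_one_iff]; simp
    simp [cutAux, this]
  | cons c rest ih =>
    by_cases h : c = '/' ∧ rest.head? = some '/'
    · have hf : PySem.Chars.find (c :: rest) ['/', '/'] = (0 : Int) := by
        apply find_eq_coe _ _ 0
        · simpa using (slash_prefix_iff c rest).mpr h
        · intro i hi; omega
      obtain ⟨hc, hh⟩ := h
      subst hc
      simp [cutAux, hh, hf]
    · have hnp : ¬ ['/', '/'] <+: (c :: rest) := fun hp => h ((slash_prefix_iff c rest).mp hp)
      by_cases hf : PySem.Chars.find rest ['/', '/'] = -1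
      · have hninf : ¬ ['/', '/'] <:+: rest := (PySem.Chars.find_eq_neg_one_iff rest _).mp hf
        have hl : PySem.Chars.find (c :: rest) ['/', '/'] = -1 := by
          rw [PySem.Chars.find_eq_neg_one_iff]
          exact fun hi => hninf ((infix_cons_iff _ c rest hnp).mp hi)
        simp [cutAux, h, hl, ih, hf]
      · have h0 : 0 ≤ PySem.Chars.find rest ['/', '/'] := by
          have := PySem.Chars.neg_one_le_find rest ['/', '/']
          omega
        obtain ⟨hp, hmin⟩ := PySem.Chars.find_spec h0
        set k := (PySem.Chars.find rest ['/', '/']).toNat with hkdef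
        have hl : PySem.Chars.find (c :: rest) ['/', '/'] = ((k + 1 : Nat) : Int) := by
          apply find_eq_coe _ _ (k + 1)
          · simpa using hp
          · intro i hi
            cases i with
            | zero => exact hnp
            | succ i' => simpa using hmin i' (by omega)
        have hrest : PySem.Chars.find rest ['/', '/'] = (k : Int) := by omega
        simp [cutAux, h, hl, ih, hrest]
        omega

-- ===== VERDICT (by name: the statement is the Claim_ definition above) =====
theorem process_spec : Claim_equal_process := by
  intro str _
  unfold Spec_process
  apply (String.toList_inj.mp · |>.symm)
  unfold process process_alt
  have hsl : PySem.List.slice uniznakovi none (some 7)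
      = ["=", "+", "-", "*", "/", "(", ")"] := by rfl
  rw [hsl]
  simp only [List.foldl_cons, List.foldl_nil]
  have hb : ("//" : String).toList = ['/', '/'] := by rfl
  by_cases hf' : PySem.Chars.find str.toList ['/', '/'] = -1
  · have hA : ¬ PySem.Str.find str "//" ≠ -1 := by simp [hb, hf']
    rw [if_neg hA, bScan_eq, cut_spec, if_pos hf']
    simp [chain_eq]
  · have hA : PySem.Str.find str "//" ≠ -1 := by simp [hb, hf']
    rw [if_pos hA, bScan_eq, cut_spec, if_neg hf']
    have h0 : 0 ≤ PySem.Chars.find str.toList ['/', '/'] := by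
      have := PySem.Chars.neg_one_le_find str.toList ['/', '/']
      omega
    simp [hb, PySem.List.slice_to _ h0, chain_eq]
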